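-- pv_equiv track=rewrite | github.com/takeny1998/algorithm-problem | softeer/p804.py | divide_message
-- ===== SOURCE A (Python) =====
-- def divide_message(message):
--     message_list = list(message)
--     divided_message = []
--
--     while True:
--         if len(message_list) == 0:
--             break
--         if len(message_list) == 1:
--             divided_message += [message_list[0], 'X']
--             break
--
--         left, right = message_list[0], message_list[1]
--
--         if left == right:
--             if (left == 'X') and (right == 'X'):
--                 divided_message += [left, 'Q']
--             else:
--                 divided_message += [left, 'X']
--             message_list = message_list[1:]
--         else:
--             divided_message += [left, right]
--             message_list = message_list[2:]
--
--     return divided_message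
-- ===== SOURCE B (Python) =====
-- def divide_message(message):
--     out = []
--     prev = None
--     for c in message:
--         if prev is None:
--             prev = c
--         elif prev == c:
--             out.append(prev)
--             out.append('Q' if prev == 'X' else 'X')
--             prev = c
--         else:
--             out.append(prev)
--             out.append(c)
--             prev = None
--     if prev is not None:
--         out.append(prev)
--         out.append('X')
--     return out
-- ===== Notes on version B (the rewrite author's own statement) =====
-- stated objective: faster
-- what changed: Replaced the two-char-at-a-time while loop with repeated list slicing by a single one-pass state machine that keeps one pending-left character and appends to the output as it scans.
import Mathlib
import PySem

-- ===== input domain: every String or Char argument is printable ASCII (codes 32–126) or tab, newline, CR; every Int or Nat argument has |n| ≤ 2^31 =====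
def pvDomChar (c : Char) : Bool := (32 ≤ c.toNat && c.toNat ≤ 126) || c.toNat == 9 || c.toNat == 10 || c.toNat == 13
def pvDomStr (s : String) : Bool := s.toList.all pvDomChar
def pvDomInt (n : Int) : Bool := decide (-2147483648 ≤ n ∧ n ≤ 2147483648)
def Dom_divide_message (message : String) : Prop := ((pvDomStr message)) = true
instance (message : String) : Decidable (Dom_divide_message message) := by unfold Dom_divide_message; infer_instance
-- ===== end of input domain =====

-- B replaces A's two-char-at-a-time while loop over a re-sliced list by a one-pass
-- state machine carrying a single pending-left character (objective: alternative).

-- ===== PORT A =====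
-- A's while loop over message_list, consuming one or two chars per iteration.
def pvLoopA : List Char → List String
  | [] => []
  | [a] => [a.toString, "X"]
  | a :: b :: t =>
      if a = b then
        (if a = 'X' ∧ b = 'X' then [a.toString, "Q"] else [a.toString, "X"]) ++ pvLoopA (b :: t)
      else
        [a.toString, b.toString] ++ pvLoopA t

def divide_message (message : String) : List String := pvLoopA message.toList

-- ===== PORT B =====
-- B's for loop: scan chars with a pending-left state `prev`, then finalize.
def pvGoB : List Char → Option Char → List String
  | [], none => []
  | [], some p => [p.toString, "X"]
  | c :: t, none => pvGoB t (some c)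
  | c :: t, some p =>
      if p = c then
        [p.toString, if p = 'X' then "Q" else "X"] ++ pvGoB t (some c)
      else
        [p.toString, c.toString] ++ pvGoB t none

def divide_message_alt (message : String) : List String := pvGoB message.toList none

-- ===== PRECONDITION & SPEC =====
def Spec_divide_message (message : String) (out : List String) : Prop := out = divide_message_alt message
instance (message : String) (out : List String) : Decidable (Spec_divide_message message out) := by unfold Spec_divide_message; infer_instance

-- ===== CLAIM (what is proved, stated in full; the proofs are below) =====
def Claim_equal_divide_message : Prop := ∀ (message : String), Dom_divide_message message → Spec_divide_message message (divide_message message)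

-- ===== LEMMAS AND PROOFS =====

theorem pvGoB_some_eq_loopA : ∀ (n : ℕ) (l : List Char), l.length ≤ n →
    (∀ a, pvGoB l (some a) = pvLoopA (a :: l)) ∧ pvGoB l none = pvLoopA l := by
  intro n
  induction n with
  | zero =>
      intro l hl
      have : l = [] := List.length_eq_zero_iff.mp (Nat.le_zero.mp hl)
      subst this
      exact ⟨fun a => rfl, rfl⟩
  | succ n ih =>
      intro l hl
      constructor
      · intro a
        cases l with
        | nil => rfl
        | cons b t =>
            have ht : t.length ≤ n := by simpa using Nat.le_of_succ_le_succ hl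
            simp only [pvGoB, pvLoopA]
            by_cases hab : a = b
            · subst hab
              simp only [if_pos rfl, (ih t ht).1 a, and_self]
              by_cases hX : a = 'X' <;> simp [hX]
            · simp only [if_neg hab, (ih t ht).2]
      · cases l with
        | nil => rfl
        | cons b t =>
            have ht : t.length ≤ n := by simpa using Nat.le_of_succ_le_succ hl
            show pvGoB t (some b) = pvLoopA (b :: t)
            exact (ih t ht).1 b

-- ===== VERDICT (by name: the statement is the Claim_ definition above) =====
theorem divide_message_spec : Claim_equal_divide_message := by
  intro message _
  unfold Spec_divide_message divide_message divide_message_alt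
  exact ((pvGoB_some_eq_loopA message.toList.length message.toList le_rfl).2).symm
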